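-- pv_equiv track=rewrite | github.com/baeksangha/python_sw | 7588_직선의삽입과삭제/source.py | solution
-- ===== SOURCE A (Python) =====
-- def solution(cmds):
--     arr = []
--     answer = []
--     for cmd in cmds:
--         flag = cmd[0]
--         if flag == 1:
--             arr.append((cmd[1], cmd[2]))
--         elif flag == 2:
--             target = cmds[cmd[1]-1]
--             if (target[1], target[2]) in arr:
--                 arr.remove((target[1], target[2]))
--         else:
--             if not arr:
--                 answer.append("NO")
--             else:
--                 max_val = 0
--                 for elem in arr:
--                     max_val = max(max_val, cmd[1]*elem[0] + elem[1])
--                 answer.append(str(max_val))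
--     return "\n".join(answer)
-- ===== SOURCE B (Python) =====
-- def solution(cmds):
--     # Offline: match each insert to the delete that kills it, producing lifetime
--     # spans (birth, death, a, b); then each query is answered by stabbing the spans.
--     n = len(cmds)
--     pending = {}   # (a, b) -> stack of birth indices of not-yet-deleted copies
--     spans = []     # (birth, death, a, b); alive at query time t iff birth < t <= death
--     for t, cmd in enumerate(cmds):
--         if cmd[0] == 1:
--             pending.setdefault((cmd[1], cmd[2]), []).append(t)
--         elif cmd[0] == 2:
--             tgt = cmds[cmd[1] - 1]
--             key = (tgt[1], tgt[2])
--             stk = pending.get(key)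
--             if stk:
--                 spans.append((stk.pop(), t, key[0], key[1]))
--     for key, stk in pending.items():
--         for b1 in stk:
--             spans.append((b1, n, key[0], key[1]))
--     out = []
--     for t, cmd in enumerate(cmds):
--         if cmd[0] != 1 and cmd[0] != 2:
--             live = [(a2, b2) for (b1, d1, a2, b2) in spans if b1 < t <= d1]
--             if not live:
--                 out.append("NO")
--             else:
--                 x = cmd[1]
--                 out.append(str(max(0, max(a2 * x + b2 for (a2, b2) in live))))
--     return "\n".join(out)
-- ===== Notes on version B (the rewrite author's own statement) =====
-- stated objective: alternative
-- what changed: B is offline: a first pass matches each insert to the delete that kills it via per-line stacks, producing lifetime spans (birth, death, a, b), and each query is then answered by stabbing those spans, instead of A's online simulation of a mutable active-line list with membership test, remove and a scan of the live list; it is exact because the multiset of lines alive at any query time is independent of which duplicate copy a delete removes. …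
-- outside the precondition, e.g. on solution([[1, 1, 1], [2, 1], [3]]): A returns 'NO', B returns 'NO'
import Mathlib
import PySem

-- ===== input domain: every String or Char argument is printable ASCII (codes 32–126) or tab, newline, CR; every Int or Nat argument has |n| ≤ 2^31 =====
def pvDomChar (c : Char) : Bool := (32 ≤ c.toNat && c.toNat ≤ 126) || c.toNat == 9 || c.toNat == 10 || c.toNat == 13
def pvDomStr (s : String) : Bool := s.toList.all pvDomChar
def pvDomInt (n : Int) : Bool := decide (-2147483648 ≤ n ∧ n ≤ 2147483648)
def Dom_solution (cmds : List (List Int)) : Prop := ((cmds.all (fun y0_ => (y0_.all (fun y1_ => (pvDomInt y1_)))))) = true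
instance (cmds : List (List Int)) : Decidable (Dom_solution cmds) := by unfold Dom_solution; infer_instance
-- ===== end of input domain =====

-- Alternative implementation: B is offline — it first matches each insert to the delete that
-- kills it (per-line stacks), producing lifetime spans, and answers each query by stabbing the
-- spans, instead of A's online simulation of a mutable active-line list.


-- ===== PORT A =====
-- one iteration of A's loop: state = (arr, answer)
def stepA (cmds : List (List Int)) (st : List (Int × Int) × List String) (cmd : List Int) :
    List (Int × Int) × List String :=
  let arr := st.1
  let ans := st.2
  let flag := cmd.getD 0 0
  if flag = 1 then
    (arr ++ [(cmd.getD 1 0, cmd.getD 2 0)], ans)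
  else if flag = 2 then
    match PySem.List.pyGet? cmds (cmd.getD 1 0 - 1) with
    | some tg =>
        let p := (tg.getD 1 0, tg.getD 2 0)
        (if p ∈ arr then arr.erase p else arr, ans)
    | none => (arr, ans)  -- Python raises IndexError here; excluded by Pre_solution
  else
    if arr.isEmpty then
      (arr, ans ++ ["NO"])
    else
      (arr, ans ++ [PySem.Int.toStr (arr.foldl (fun m e => max m (cmd.getD 1 0 * e.1 + e.2)) 0)])

def solution (cmds : List (List Int)) : String :=
  PySem.Str.join "\n" (cmds.foldl (stepA cmds) ([], [])).2

-- ===== PORT B =====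
-- pass 1: match inserts to deletes; state = (pending stacks, finished spans, time)
def altStep1 (cmds : List (List Int))
    (st : PySem.Dict (Int × Int) (List Int) × List (Int × Int × Int × Int) × Int)
    (cmd : List Int) : PySem.Dict (Int × Int) (List Int) × List (Int × Int × Int × Int) × Int :=
  let pend := st.1
  let spans := st.2.1
  let t := st.2.2
  if cmd.getD 0 0 = 1 then
    let k := (cmd.getD 1 0, cmd.getD 2 0)
    (pend.insert k (pend.getD k [] ++ [t]), spans, t + 1)
  else if cmd.getD 0 0 = 2 then
    match PySem.List.pyGet? cmds (cmd.getD 1 0 - 1) with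
    | some tg =>
        let k := (tg.getD 1 0, tg.getD 2 0)
        let stk := pend.getD k []
        match stk.getLast? with
        | some b1 => (pend.insert k stk.dropLast, spans ++ [(b1, t, k.1, k.2)], t + 1)
        | none => (pend, spans, t + 1)
    | none => (pend, spans, t + 1)  -- Python raises IndexError here; excluded by Pre_solution
  else (pend, spans, t + 1)

-- after pass 1, never-deleted pending inserts live to the end (death = len(cmds))
def altSpans (cmds : List (List Int)) : List (Int × Int × Int × Int) :=
  let st := cmds.foldl (altStep1 cmds) (PySem.Dict.empty, [], 0)
  st.2.1 ++ st.1.items.flatMap (fun kv => kv.2.map (fun b1 => (b1, (cmds.length : Int), kv.1.1, kv.1.2)))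

-- pass 2: answer each query by stabbing the spans; state = (out, time)
def altStep2 (spans : List (Int × Int × Int × Int)) (st : List String × Int) (cmd : List Int) :
    List String × Int :=
  let out := st.1
  let t := st.2
  if cmd.getD 0 0 = 1 then (out, t + 1)
  else if cmd.getD 0 0 = 2 then (out, t + 1)
  else
    let live := (spans.filter (fun sp => decide (sp.1 < t ∧ t ≤ sp.2.1))).map
      (fun sp => (sp.2.2.1, sp.2.2.2))
    if live.isEmpty then (out ++ ["NO"], t + 1)
    else
      let x := cmd.getD 1 0
      (out ++ [PySem.Int.toStr
        (max 0 ((PySem.List.max? (live.map (fun p => p.1 * x + p.2)) (fun y => y)).getD 0))],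
       t + 1)

def solution_alt (cmds : List (List Int)) : String :=
  PySem.Str.join "\n" (cmds.foldl (altStep2 (altSpans cmds)) ([], 0)).1

-- ===== PRECONDITION & SPEC =====
-- Pre_ excludes exactly the inputs where the Python raises (a command list too short for the
-- fields its flag reads, or a delete whose 1-based back-reference — Python indexing, negative
-- wrap included — is out of range or names a command with fewer than 3 fields), except that a
-- 1-field query is also excluded when an earlier insert exists, because whether A reads the
-- missing cmd[1] there depends on the run's state (the active set may happen to be empty); A
-- and B behave identically on that excluded corner.
def Pre_solution (cmds : List (List Int)) : Prop :=
  ∀ i < cmds.length,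
    1 ≤ (cmds.getD i []).length ∧
    ((cmds.getD i []).getD 0 0 = 1 → 3 ≤ (cmds.getD i []).length) ∧
    ((cmds.getD i []).getD 0 0 = 2 → 2 ≤ (cmds.getD i []).length ∧
        3 ≤ ((PySem.List.pyGet? cmds ((cmds.getD i []).getD 1 0 - 1)).getD []).length) ∧
    ((cmds.getD i []).getD 0 0 ≠ 1 → (cmds.getD i []).getD 0 0 ≠ 2 →
        (2 ≤ (cmds.getD i []).length ∨ ∀ c ∈ cmds.take i, c.getD 0 0 ≠ 1))
instance (cmds : List (List Int)) : Decidable (Pre_solution cmds) := by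
  unfold Pre_solution; infer_instance

def pvWitness_solution : List (List Int) := [[1, 1, 2], [3, 3], [2, 1], [3, 5]]

def Spec_solution (cmds : List (List Int)) (out : String) : Prop := out = solution_alt cmds
instance (cmds : List (List Int)) (out : String) : Decidable (Spec_solution cmds out) := by
  unfold Spec_solution; infer_instance

-- ===== CLAIM (what is proved, stated in full; the proofs are below) =====
def Claim_equal_solution : Prop :=
  ∀ (cmds : List (List Int)), Dom_solution cmds → Pre_solution cmds →
    Spec_solution cmds (solution cmds)

-- ===== LEMMAS AND PROOFS =====

-- A's arr component only (proof helper mirroring stepA's first component)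
def stepArr (cmds : List (List Int)) (arr : List (Int × Int)) (cmd : List Int) :
    List (Int × Int) :=
  if cmd.getD 0 0 = 1 then arr ++ [(cmd.getD 1 0, cmd.getD 2 0)]
  else if cmd.getD 0 0 = 2 then
    match PySem.List.pyGet? cmds (cmd.getD 1 0 - 1) with
    | some tg =>
        let p := (tg.getD 1 0, tg.getD 2 0)
        if p ∈ arr then arr.erase p else arr
    | none => arr
  else arr

-- number of spans of value v alive at time t
def cA (F : List (Int × Int × Int × Int)) (v : Int × Int) (t : Int) : Nat :=
  ((F.filter (fun sp => decide (sp.1 < t ∧ t ≤ sp.2.1))).map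
    (fun sp => (sp.2.2.1, sp.2.2.2))).count v

-- number of pending births of value v strictly before time s
def cP (pend : PySem.Dict (Int × Int) (List Int)) (v : Int × Int) (s : Int) : Nat :=
  ((pend.getD v []).filter (fun b1 => decide (b1 < s))).length

-- close a pass-1 state: finished spans plus pending inserts alive to the end
def finish (n : Int)
    (st : PySem.Dict (Int × Int) (List Int) × List (Int × Int × Int × Int) × Int) :
    List (Int × Int × Int × Int) :=
  st.2.1 ++ st.1.items.flatMap (fun kv => kv.2.map (fun b1 => (b1, n, kv.1.1, kv.1.2)))

lemma altSpans_eq_finish (cmds : List (List Int)) :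
    altSpans cmds = finish (cmds.length : Int)
      (cmds.foldl (altStep1 cmds) (PySem.Dict.empty, [], 0)) := rfl

lemma cA_append (F1 F2 : List (Int × Int × Int × Int)) (v : Int × Int) (t : Int) :
    cA (F1 ++ F2) v t = cA F1 v t + cA F2 v t := by
  simp [cA, List.filter_append, List.count_append]

lemma cA_singleton (b1 d a2 b2 : Int) (v : Int × Int) (t : Int) :
    cA [(b1, d, a2, b2)] v t =
      if b1 < t ∧ t ≤ d ∧ (a2, b2) = v then 1 else 0 := by
  unfold cA
  by_cases h1 : b1 < t
  · by_cases h2 : t ≤ d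
    · by_cases h3 : (a2, b2) = v
      · simp [List.filter, h1, h2, h3]
      · simp [List.filter, h1, h2, h3]
    · simp [List.filter, h1, h2]
  · simp [List.filter, h1]

-- dead spans contribute nothing
lemma cA_eq_zero_of_dead (F : List (Int × Int × Int × Int)) (v : Int × Int) (t : Int)
    (h : ∀ sp ∈ F, sp.2.1 < t) : cA F v t = 0 := by
  unfold cA
  have he : F.filter (fun sp => decide (sp.1 < t ∧ t ≤ sp.2.1)) = [] := by
    rw [List.filter_eq_nil_iff]
    intro sp hsp
    have := h sp hsp
    simp
    omega
  rw [he]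
  rfl

-- getD via items (bridge to the raw association list)
lemma getD_eq_find? (pend : PySem.Dict (Int × Int) (List Int)) (v : Int × Int) :
    pend.getD v [] = ((pend.items.find? (fun p => p.1 == v)).map Prod.snd).getD [] := by
  simp [PySem.Dict.getD, PySem.Dict.get?]

lemma cA_map_births (n s : Int) (hs : s ≤ n) (k : Int × Int) (v : Int × Int) :
    ∀ bs : List Int, cA (bs.map (fun b1 => (b1, n, k.1, k.2))) v s =
      if k = v then (bs.filter (fun b1 => decide (b1 < s))).length else 0 := by
  intro bs
  induction bs with
  | nil => simp [cA]
  | cons b tl ih =>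
    rw [List.map_cons, ← List.singleton_append, cA_append, ih, cA_singleton,
      List.filter_cons]
    have hkk : ((k.1, k.2) : Int × Int) = k := rfl
    rw [hkk]
    by_cases hkv : k = v <;> by_cases hb : b < s <;> simp [hkv, hb, hs] <;> omega

lemma cA_flatMap_zero (n s : Int) (hs : s ≤ n) (v : Int × Int) :
    ∀ (L : List ((Int × Int) × List Int)), (∀ kv ∈ L, kv.1 ≠ v) →
    cA (L.flatMap (fun kv => kv.2.map (fun b1 => (b1, n, kv.1.1, kv.1.2)))) v s = 0 := by
  intro L
  induction L with
  | nil => intro _; rfl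
  | cons kv rest ih =>
    intro h
    rw [List.flatMap_cons, cA_append, cA_map_births n s hs kv.1 v,
      if_neg (h kv List.mem_cons_self), ih (fun x hx => h x (List.mem_cons_of_mem _ hx))]

-- counting the finalize part over a raw association list with distinct keys
lemma finalize_count_raw (n s : Int) (hs : s ≤ n) (v : Int × Int) :
    ∀ (L : List ((Int × Int) × List Int)), (L.map Prod.fst).Nodup →
    cA (L.flatMap (fun kv => kv.2.map (fun b1 => (b1, n, kv.1.1, kv.1.2)))) v s =
      (((((L.find? (fun p => p.1 == v)).map Prod.snd).getD []).filter
        (fun b1 => decide (b1 < s))).length) := by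
  intro L
  induction L with
  | nil => intro _; rfl
  | cons kv rest ih =>
    intro hnd
    rw [List.flatMap_cons, cA_append, cA_map_births n s hs kv.1 v]
    by_cases hkv : kv.1 = v
    · rw [if_pos hkv, List.find?_cons_of_pos (by simp [hkv])]
      have hz : cA (rest.flatMap (fun kv => kv.2.map (fun b1 => (b1, n, kv.1.1, kv.1.2)))) v s = 0 := by
        apply cA_flatMap_zero n s hs
        intro x hx hxv
        have : kv.1 ∈ rest.map Prod.fst := by
          rw [hkv, ← hxv]; exact List.mem_map_of_mem hx
        rw [List.map_cons] at hnd
        exact (List.nodup_cons.mp hnd).1 this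
      rw [hz]
      simp
    · rw [if_neg hkv, List.find?_cons_of_neg (by simp [hkv]),
        ih (by rw [List.map_cons] at hnd; exact (List.nodup_cons.mp hnd).2)]
      omega

lemma finalize_count (pend : PySem.Dict (Int × Int) (List Int)) (hnd : pend.keys.Nodup)
    (n s : Int) (hs : s ≤ n) (v : Int × Int) :
    cA (pend.items.flatMap (fun kv => kv.2.map (fun b1 => (b1, n, kv.1.1, kv.1.2)))) v s =
      cP pend v s := by
  rw [finalize_count_raw n s hs v pend.items (by simpa [PySem.Dict.keys] using hnd)]
  rw [cP, getD_eq_find?]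

-- L1: for times s ≤ current time t, the rest of the run does not change aliveness at s
lemma run_count_low (cmds : List (List Int)) :
    ∀ (l : List (List Int)) (pend : PySem.Dict (Int × Int) (List Int))
      (spans : List (Int × Int × Int × Int)) (t : Int),
      pend.keys.Nodup →
      t + (l.length : Int) ≤ (cmds.length : Int) →
      ∀ s ≤ t, ∀ v,
        cA (finish (cmds.length : Int) (l.foldl (altStep1 cmds) (pend, spans, t))) v s =
          cA spans v s + cP pend v s := by
  intro l
  induction l with
  | nil =>
    intro pend spans t hnd hb s hs v
    simp only [List.foldl_nil, finish]
    rw [cA_append, finalize_count pend hnd _ s (by omega) v]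
  | cons c l' ih =>
    intro pend spans t hnd hb s hs v
    have hb' : (t + 1) + (l'.length : Int) ≤ (cmds.length : Int) := by
      simp only [List.length_cons] at hb; push_cast at hb; omega
    rw [List.foldl_cons]
    by_cases h1 : c.getD 0 0 = 1
    · have hstep : altStep1 cmds (pend, spans, t) c =
        (pend.insert (c.getD 1 0, c.getD 2 0)
          (pend.getD (c.getD 1 0, c.getD 2 0) [] ++ [t]), spans, t + 1) := by
        simp only [altStep1]
        rw [if_pos h1]
      rw [hstep, ih _ _ _ (PySem.Dict.nodup_keys_insert _ _ _ hnd) hb' s (by omega) v]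
      congr 1
      unfold cP
      rw [PySem.Dict.getD_insert]
      by_cases hv : v = (c.getD 1 0, c.getD 2 0)
      · rw [if_pos hv, hv, List.filter_append]
        have h0 : ([t].filter (fun b1 => decide (b1 < s))) = [] := by simp; omega
        rw [h0, List.append_nil, ← hv]
      · rw [if_neg hv]
    · by_cases h2 : c.getD 0 0 = 2
      · cases hg : PySem.List.pyGet? cmds (c.getD 1 0 - 1) with
        | none =>
          have hstep : altStep1 cmds (pend, spans, t) c = (pend, spans, t + 1) := by
            simp only [altStep1]
            rw [if_neg h1, if_pos h2, hg]
          rw [hstep, ih _ _ _ hnd hb' s (by omega) v]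
        | some tg =>
          cases hL : (pend.getD (tg.getD 1 0, tg.getD 2 0) []).getLast? with
          | none =>
            have hstep : altStep1 cmds (pend, spans, t) c = (pend, spans, t + 1) := by
              simp only [altStep1]
              rw [if_neg h1, if_pos h2, hg]
              dsimp only
              rw [hL]
            rw [hstep, ih _ _ _ hnd hb' s (by omega) v]
          | some b1 =>
            have hstep : altStep1 cmds (pend, spans, t) c =
              (pend.insert (tg.getD 1 0, tg.getD 2 0)
                 (pend.getD (tg.getD 1 0, tg.getD 2 0) []).dropLast,
               spans ++ [(b1, t, tg.getD 1 0, tg.getD 2 0)], t + 1) := by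
              simp only [altStep1]
              rw [if_neg h1, if_pos h2, hg]
              dsimp only
              rw [hL]
            rw [hstep, ih _ _ _ (PySem.Dict.nodup_keys_insert _ _ _ hnd) hb' s (by omega) v,
              cA_append, cA_singleton]
            have hstk := List.dropLast_append_getLast? b1 (Option.mem_def.mpr hL)
            unfold cP
            rw [PySem.Dict.getD_insert]
            generalize hkk : ((tg.getD 1 0, tg.getD 2 0) : Int × Int) = k at hstk ⊢
            by_cases hv : v = k
            · subst hv
              rw [if_pos rfl]
              have hsplit : ((pend.getD v []).filter (fun b1 => decide (b1 < s))).length =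
                  ((pend.getD v []).dropLast.filter (fun b1 => decide (b1 < s))).length +
                    (if b1 < s then 1 else 0) := by
                conv_lhs => rw [← hstk]
                rw [List.filter_append]
                by_cases hb1 : b1 < s <;> simp [hb1]
              rw [hsplit]
              by_cases hb1 : b1 < s <;> simp [hb1, hs] <;> omega
            · rw [if_neg hv]
              simp [Ne.symm hv]
      · have hstep : altStep1 cmds (pend, spans, t) c = (pend, spans, t + 1) := by
          simp only [altStep1]
          rw [if_neg h1, if_neg h2]
        rw [hstep, ih _ _ _ hnd hb' s (by omega) v]


-- births stored anywhere in the dict are the births of its stacks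
lemma getD_births (pend : PySem.Dict (Int × Int) (List Int)) (t : Int)
    (h3 : ∀ kv ∈ pend.items, ∀ b1 ∈ kv.2, b1 < t) :
    ∀ v, ∀ b1 ∈ pend.getD v [], b1 < t := by
  intro v b1 hbm
  cases hq : pend.get? v with
  | none =>
    rw [PySem.Dict.getD_of_get?_eq_none _ _ hq] at hbm
    simp at hbm
  | some stk =>
    rw [PySem.Dict.getD_of_get?_eq_some _ _ hq] at hbm
    exact h3 (v, stk) (PySem.Dict.mem_items_of_get?_eq_some _ hq) b1 hbm

lemma cP_full (pend : PySem.Dict (Int × Int) (List Int)) (t : Int)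
    (h3 : ∀ kv ∈ pend.items, ∀ b1 ∈ kv.2, b1 < t) (v : Int × Int) :
    cP pend v t = (pend.getD v []).length := by
  unfold cP
  congr 1
  apply List.filter_eq_self.mpr
  intro b1 hbm
  have := getD_births pend t h3 v b1 hbm
  simpa using this

-- k = 0 of the main invariant: aliveness NOW equals the count in arr
lemma run_count_zero (cmds : List (List Int)) (l : List (List Int))
    (pend : PySem.Dict (Int × Int) (List Int)) (spans : List (Int × Int × Int × Int))
    (t : Int) (arr : List (Int × Int))
    (hnd : pend.keys.Nodup)
    (h1 : ∀ v, (pend.getD v []).length = arr.count v)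
    (h3 : ∀ kv ∈ pend.items, ∀ b1 ∈ kv.2, b1 < t)
    (h4 : ∀ sp ∈ spans, sp.2.1 < t)
    (hb : t + (l.length : Int) ≤ (cmds.length : Int)) (v : Int × Int) :
    cA (finish (cmds.length : Int) (l.foldl (altStep1 cmds) (pend, spans, t))) v t =
      arr.count v := by
  rw [run_count_low cmds l pend spans t hnd hb t (le_refl t) v,
    cA_eq_zero_of_dead spans v t h4, cP_full pend t h3 v, h1 v]
  omega

-- L2: aliveness at any future time t+k equals the count in A's simulated arr
lemma run_count (cmds : List (List Int)) :
    ∀ (l : List (List Int)) (pend : PySem.Dict (Int × Int) (List Int))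
      (spans : List (Int × Int × Int × Int)) (t : Int) (arr : List (Int × Int)),
      pend.keys.Nodup →
      (∀ v, (pend.getD v []).length = arr.count v) →
      (∀ kv ∈ pend.items, ∀ b1 ∈ kv.2, b1 < t) →
      (∀ sp ∈ spans, sp.2.1 < t) →
      t + (l.length : Int) ≤ (cmds.length : Int) →
      ∀ (k : Nat), k ≤ l.length → ∀ v,
        cA (finish (cmds.length : Int) (l.foldl (altStep1 cmds) (pend, spans, t))) v
            (t + (k : Int)) =
          ((l.take k).foldl (stepArr cmds) arr).count v := by
  intro l
  induction l with
  | nil =>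
    intro pend spans t arr hnd h1 h3 h4 hb k hk v
    have hk0 : k = 0 := Nat.le_zero.mp hk
    subst hk0
    simp only [Nat.cast_zero, add_zero, List.take_nil, List.foldl_nil]
    exact run_count_zero cmds [] pend spans t arr hnd h1 h3 h4 hb v
  | cons c l' ih =>
    intro pend spans t arr hnd h1 h3 h4 hb k hk v
    cases k with
    | zero =>
      simp only [Nat.cast_zero, add_zero, List.take_zero, List.foldl_nil]
      exact run_count_zero cmds (c :: l') pend spans t arr hnd h1 h3 h4 hb v
    | succ k =>
      have hb' : (t + 1) + (l'.length : Int) ≤ (cmds.length : Int) := by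
        simp only [List.length_cons] at hb; push_cast at hb; omega
      have hk' : k ≤ l'.length := by simpa using hk
      have hidx : t + ((k + 1 : Nat) : Int) = (t + 1) + (k : Int) := by push_cast; ring
      rw [hidx, List.take_succ_cons, List.foldl_cons, List.foldl_cons]
      by_cases hf1 : c.getD 0 0 = 1
      · have hstep : altStep1 cmds (pend, spans, t) c =
          (pend.insert (c.getD 1 0, c.getD 2 0)
            (pend.getD (c.getD 1 0, c.getD 2 0) [] ++ [t]), spans, t + 1) := by
          simp only [altStep1]
          rw [if_pos hf1]
        have hstepA : stepArr cmds arr c = arr ++ [(c.getD 1 0, c.getD 2 0)] := by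
          simp only [stepArr]
          rw [if_pos hf1]
        rw [hstep, hstepA]
        apply ih _ _ _ _ (PySem.Dict.nodup_keys_insert _ _ _ hnd) _ _ _ hb' k hk' v
        · intro v0
          rw [PySem.Dict.getD_insert, List.count_append]
          by_cases hv : v0 = (c.getD 1 0, c.getD 2 0)
          · rw [if_pos hv, hv]
            simp [List.length_append, h1 _]
          · rw [if_neg hv, h1 v0]
            have : List.count v0 [((c.getD 1 0, c.getD 2 0) : Int × Int)] = 0 := by
              rw [List.count_eq_zero]
              simp
              exact fun h => hv h
            omega
        · intro kv hkv b1 hbm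
          rcases (PySem.Dict.mem_items_insert _ _ _ _).mp hkv with hkv' | hkv'
          · subst hkv'
            rcases List.mem_append.mp hbm with hbm' | hbm'
            · have := getD_births pend t h3 _ b1 hbm'
              omega
            · simp at hbm'
              omega
          · have := h3 kv hkv'.1 b1 hbm
            omega
        · intro sp hsp
          have := h4 sp hsp
          omega
      · by_cases hf2 : c.getD 0 0 = 2
        · cases hg : PySem.List.pyGet? cmds (c.getD 1 0 - 1) with
          | none =>
            have hstep : altStep1 cmds (pend, spans, t) c = (pend, spans, t + 1) := by
              simp only [altStep1]
              rw [if_neg hf1, if_pos hf2, hg]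
            have hstepA : stepArr cmds arr c = arr := by
              simp only [stepArr]
              rw [if_neg hf1, if_pos hf2, hg]
            rw [hstep, hstepA]
            exact ih _ _ _ _ hnd h1
              (fun kv hkv b1 hbm => lt_trans (h3 kv hkv b1 hbm) (by omega))
              (fun sp hsp => lt_trans (h4 sp hsp) (by omega)) hb' k hk' v
          | some tg =>
            cases hL : (pend.getD (tg.getD 1 0, tg.getD 2 0) []).getLast? with
            | none =>
              have hstk0 : pend.getD (tg.getD 1 0, tg.getD 2 0) [] = [] :=
                List.getLast?_eq_none_iff.mp hL
              have hnm : ((tg.getD 1 0, tg.getD 2 0) : Int × Int) ∉ arr := by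
                intro hm
                have := h1 ((tg.getD 1 0, tg.getD 2 0) : Int × Int)
                rw [hstk0] at this
                have hc := List.count_pos_iff.mpr hm
                rw [List.length_nil] at this
                omega
              have hstep : altStep1 cmds (pend, spans, t) c = (pend, spans, t + 1) := by
                simp only [altStep1]
                rw [if_neg hf1, if_pos hf2, hg]
                dsimp only
                rw [hL]
              have hstepA : stepArr cmds arr c = arr := by
                simp only [stepArr]
                rw [if_neg hf1, if_pos hf2, hg]
                dsimp only
                rw [if_neg hnm]
              rw [hstep, hstepA]
              exact ih _ _ _ _ hnd h1
                (fun kv hkv b1 hbm => lt_trans (h3 kv hkv b1 hbm) (by omega))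
                (fun sp hsp => lt_trans (h4 sp hsp) (by omega)) hb' k hk' v
            | some b1 =>
              have hstk := List.dropLast_append_getLast? b1 (Option.mem_def.mpr hL)
              have hcnt : 0 < arr.count ((tg.getD 1 0, tg.getD 2 0) : Int × Int) := by
                have := h1 ((tg.getD 1 0, tg.getD 2 0) : Int × Int)
                rw [← this, ← hstk]
                simp
              have hmem : ((tg.getD 1 0, tg.getD 2 0) : Int × Int) ∈ arr :=
                List.count_pos_iff.mp hcnt
              have hstep : altStep1 cmds (pend, spans, t) c =
                (pend.insert (tg.getD 1 0, tg.getD 2 0)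
                   (pend.getD (tg.getD 1 0, tg.getD 2 0) []).dropLast,
                 spans ++ [(b1, t, tg.getD 1 0, tg.getD 2 0)], t + 1) := by
                simp only [altStep1]
                rw [if_neg hf1, if_pos hf2, hg]
                dsimp only
                rw [hL]
              have hstepA : stepArr cmds arr c =
                  arr.erase ((tg.getD 1 0, tg.getD 2 0) : Int × Int) := by
                simp only [stepArr]
                rw [if_neg hf1, if_pos hf2, hg]
                dsimp only
                rw [if_pos hmem]
              rw [hstep, hstepA]
              apply ih _ _ _ _ (PySem.Dict.nodup_keys_insert _ _ _ hnd) _ _ _ hb' k hk' v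
              · intro v0
                rw [PySem.Dict.getD_insert]
                by_cases hv : v0 = (tg.getD 1 0, tg.getD 2 0)
                · rw [if_pos hv, hv, List.count_erase_self]
                  have hlen : (pend.getD ((tg.getD 1 0, tg.getD 2 0) : Int × Int) []).length =
                      (pend.getD ((tg.getD 1 0, tg.getD 2 0) : Int × Int) []).dropLast.length + 1 := by
                    conv_lhs => rw [← hstk]
                    simp
                  have := h1 ((tg.getD 1 0, tg.getD 2 0) : Int × Int)
                  omega
                · rw [if_neg hv, h1 v0, List.count_erase_of_ne hv]
              · intro kv hkv b2 hbm
                rcases (PySem.Dict.mem_items_insert _ _ _ _).mp hkv with hkv' | hkv'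
                · subst hkv'
                  have : b2 ∈ pend.getD ((tg.getD 1 0, tg.getD 2 0) : Int × Int) [] := by
                    rw [← hstk]
                    exact List.mem_append_left _ hbm
                  have := getD_births pend t h3 _ b2 this
                  omega
                · have := h3 kv hkv'.1 b2 hbm
                  omega
              · intro sp hsp
                rcases List.mem_append.mp hsp with hsp' | hsp'
                · have := h4 sp hsp'
                  omega
                · simp at hsp'
                  subst hsp'
                  simp
        · have hstep : altStep1 cmds (pend, spans, t) c = (pend, spans, t + 1) := by
            simp only [altStep1]
            rw [if_neg hf1, if_neg hf2]
          have hstepA : stepArr cmds arr c = arr := by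
            simp only [stepArr]
            rw [if_neg hf1, if_neg hf2]
          rw [hstep, hstepA]
          exact ih _ _ _ _ hnd h1
            (fun kv hkv b1 hbm => lt_trans (h3 kv hkv b1 hbm) (by omega))
            (fun sp hsp => lt_trans (h4 sp hsp) (by omega)) hb' k hk' v

-- instantiated at the start state
lemma altSpans_count (cmds : List (List Int)) :
    ∀ (k : Nat), k ≤ cmds.length → ∀ v,
      cA (altSpans cmds) v (k : Int) =
        ((cmds.take k).foldl (stepArr cmds) []).count v := by
  intro k hk v
  rw [altSpans_eq_finish]
  have h0 := run_count cmds cmds PySem.Dict.empty [] 0 []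
    PySem.Dict.nodup_keys_empty
    (by intro v0; simp [PySem.Dict.getD_empty])
    (by intro kv hkv; simp [PySem.Dict.empty] at hkv)
    (by intro sp hsp; simp at hsp)
    (by simp) k hk v
  simpa using h0

-- equal counts ⇒ equal membership
lemma mem_iff_of_count_eq {l1 l2 : List (Int × Int)}
    (h : ∀ v, l1.count v = l2.count v) : ∀ v, v ∈ l1 ↔ v ∈ l2 := by
  intro v
  constructor <;> intro hv
  · have := List.count_pos_iff.mpr hv
    rw [h v] at this
    exact List.count_pos_iff.mp this
  · have := List.count_pos_iff.mpr hv
    rw [← h v] at this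
    exact List.count_pos_iff.mp this

lemma isEmpty_eq_of_count_eq {l1 l2 : List (Int × Int)}
    (h : ∀ v, l1.count v = l2.count v) : l1.isEmpty = l2.isEmpty := by
  cases h1 : l1 with
  | nil =>
    cases h2 : l2 with
    | nil => rfl
    | cons x t =>
      exfalso
      have := (mem_iff_of_count_eq h x).mpr (by rw [h2]; exact List.mem_cons_self)
      simp [h1] at this
  | cons x t =>
    cases h2 : l2 with
    | nil =>
      exfalso
      have := (mem_iff_of_count_eq h x).mp (by rw [h1]; exact List.mem_cons_self)
      simp [h2] at this
    | cons y s => rfl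

lemma foldl_max_eq_of_mem_iff (a b : List Int) (h : ∀ x, x ∈ a ↔ x ∈ b) :
    a.foldl max 0 = b.foldl max 0 := by
  apply le_antisymm
  · rcases PySem.List.foldl_max_mem a 0 with h0 | hm
    · rw [h0]; exact (PySem.List.le_foldl_max b 0).1
    · exact (PySem.List.le_foldl_max b 0).2 _ ((h _).mp hm)
  · rcases PySem.List.foldl_max_mem b 0 with h0 | hm
    · rw [h0]; exact (PySem.List.le_foldl_max a 0).1
    · exact (PySem.List.le_foldl_max a 0).2 _ ((h _).mpr hm)

lemma maxproj_eq (f : Int × Int → Int) (l₁ l₂ : List (Int × Int))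
    (h : ∀ x, x ∈ l₁ ↔ x ∈ l₂) :
    l₁.foldl (fun m e => max m (f e)) 0 = l₂.foldl (fun m e => max m (f e)) 0 := by
  have e1 : l₁.foldl (fun m e => max m (f e)) 0 = (l₁.map f).foldl max 0 :=
    (List.foldl_map (f := f) (g := max) (l := l₁) (init := 0)).symm
  have e2 : l₂.foldl (fun m e => max m (f e)) 0 = (l₂.map f).foldl max 0 :=
    (List.foldl_map (f := f) (g := max) (l := l₂) (init := 0)).symm
  rw [e1, e2]
  apply foldl_max_eq_of_mem_iff
  intro x
  simp only [List.mem_map]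
  constructor
  · rintro ⟨y, hy, rfl⟩; exact ⟨y, (h y).mp hy, rfl⟩
  · rintro ⟨y, hy, rfl⟩; exact ⟨y, (h y).mpr hy, rfl⟩

lemma foldl_max_pull (xs : List Int) : ∀ a b : Int, xs.foldl max (max a b) = max a (xs.foldl max b) := by
  induction xs with
  | nil => intro a b; rfl
  | cons c t ih =>
    intro a b
    simp only [List.foldl_cons]
    rw [max_assoc, ih]

-- running max from 0 vs Python's max(0, max(list)) on a nonempty list
lemma foldl_proj_max? (f : Int × Int → Int) (l : List (Int × Int)) (hne : l ≠ []) :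
    l.foldl (fun m e => max m (f e)) 0 =
      max 0 ((PySem.List.max? (l.map f) (fun y => y)).getD 0) := by
  cases l with
  | nil => exact absurd rfl hne
  | cons y tl =>
    rw [List.map_cons, PySem.List.max?_id_cons]
    have e1 : (y :: tl).foldl (fun m e => max m (f e)) 0 = ((y :: tl).map f).foldl max 0 :=
      (List.foldl_map (f := f) (g := max) (l := y :: tl) (init := 0)).symm
    rw [e1, List.map_cons, List.foldl_cons, foldl_max_pull]
    rfl

-- one step of A leaves its arr component as stepArr does
lemma pass2 (cmds : List (List Int))
    (hF : ∀ (k : Nat), k ≤ cmds.length → ∀ v,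
      cA (altSpans cmds) v (k : Int) = ((cmds.take k).foldl (stepArr cmds) []).count v) :
    ∀ (l : List (List Int)) (t : Nat), cmds.drop t = l → ∀ ans,
      (l.foldl (stepA cmds) ((cmds.take t).foldl (stepArr cmds) [], ans)).2 =
        (l.foldl (altStep2 (altSpans cmds)) (ans, (t : Int))).1 := by
  intro l
  induction l with
  | nil => intro t _ ans; rfl
  | cons c l' ih =>
    intro t hdrop ans
    have ht : t < cmds.length := by
      by_contra hge
      have : cmds.drop t = [] := List.drop_eq_nil_of_le (by omega)
      rw [hdrop] at this
      exact List.cons_ne_nil _ _ this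
    have hget : cmds[t]? = some c := by
      have h0 : (cmds.drop t)[0]? = cmds[t]? := by
        simp [List.getElem?_drop]
      rw [hdrop] at h0
      simpa using h0.symm
    have hdrop' : cmds.drop (t + 1) = l' := by
      have : cmds.drop (t + 1) = (cmds.drop t).drop 1 := by
        rw [List.drop_drop]
      rw [this, hdrop]
      rfl
    have htake : cmds.take (t + 1) = cmds.take t ++ [c] := by
      rw [List.take_add_one, hget]
      rfl
    have hcast : ((t : Nat) : Int) + 1 = (((t + 1 : Nat)) : Int) := by push_cast; ring
    rw [List.foldl_cons, List.foldl_cons]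
    by_cases hf1 : c.getD 0 0 = 1
    · have hA : stepA cmds ((cmds.take t).foldl (stepArr cmds) [], ans) c =
          ((cmds.take t).foldl (stepArr cmds) [] ++ [(c.getD 1 0, c.getD 2 0)], ans) := by
        simp only [stepA]
        rw [if_pos hf1]
      have hB : altStep2 (altSpans cmds) (ans, (t : Int)) c = (ans, (t : Int) + 1) := by
        simp only [altStep2]
        rw [if_pos hf1]
      have harr' : (cmds.take t).foldl (stepArr cmds) [] ++ [(c.getD 1 0, c.getD 2 0)] =
          (cmds.take (t + 1)).foldl (stepArr cmds) [] := by
        rw [htake, List.foldl_append, List.foldl_cons, List.foldl_nil]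
        simp only [stepArr]
        rw [if_pos hf1]
      rw [hA, hB, harr', hcast]
      exact ih (t + 1) hdrop' ans
    · by_cases hf2 : c.getD 0 0 = 2
      · have hA : stepA cmds ((cmds.take t).foldl (stepArr cmds) [], ans) c =
            (stepArr cmds ((cmds.take t).foldl (stepArr cmds) []) c, ans) := by
          simp only [stepA, stepArr]
          rw [if_neg hf1, if_pos hf2, if_neg hf1, if_pos hf2]
          cases PySem.List.pyGet? cmds (c.getD 1 0 - 1) <;> rfl
        have hB : altStep2 (altSpans cmds) (ans, (t : Int)) c = (ans, (t : Int) + 1) := by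
          simp only [altStep2]
          rw [if_neg hf1, if_pos hf2]
        have harr' : stepArr cmds ((cmds.take t).foldl (stepArr cmds) []) c =
            (cmds.take (t + 1)).foldl (stepArr cmds) [] := by
          rw [htake, List.foldl_append, List.foldl_cons, List.foldl_nil]
        rw [hA, hB, harr', hcast]
        exact ih (t + 1) hdrop' ans
      · -- query command
        set arrT := (cmds.take t).foldl (stepArr cmds) [] with harrT
        set live := (((altSpans cmds).filter
            (fun sp => decide (sp.1 < (t : Int) ∧ (t : Int) ≤ sp.2.1))).map
            (fun sp => (sp.2.2.1, sp.2.2.2))) with hlive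
        have hcounts : ∀ v, live.count v = arrT.count v := by
          intro v
          exact hF t (le_of_lt ht) v
        have hemp : live.isEmpty = arrT.isEmpty := isEmpty_eq_of_count_eq hcounts
        have harr' : stepArr cmds arrT c = (cmds.take (t + 1)).foldl (stepArr cmds) [] := by
          rw [htake, List.foldl_append, List.foldl_cons, List.foldl_nil]
        have hArrStep : stepArr cmds arrT c = arrT := by
          simp only [stepArr]
          rw [if_neg hf1, if_neg hf2]
        by_cases he : arrT.isEmpty
        · have hA : stepA cmds (arrT, ans) c = (arrT, ans ++ ["NO"]) := by
            simp only [stepA]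
            rw [if_neg hf1, if_neg hf2, if_pos he]
          have hB : altStep2 (altSpans cmds) (ans, (t : Int)) c =
              (ans ++ ["NO"], (t : Int) + 1) := by
            simp only [altStep2]
            rw [if_neg hf1, if_neg hf2, ← hlive, if_pos (hemp.trans he)]
          rw [hA, hB, show arrT = (cmds.take (t + 1)).foldl (stepArr cmds) [] from
            hArrStep ▸ harr', hcast]
          exact ih (t + 1) hdrop' (ans ++ ["NO"])
        · have hlne : live ≠ [] := by
            intro h0
            rw [h0] at hemp
            simp at hemp
            exact he (by simp [hemp])
          have hmax : arrT.foldl (fun m e => max m (c.getD 1 0 * e.1 + e.2)) 0 =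
              max 0 ((PySem.List.max? (live.map
                (fun p => p.1 * c.getD 1 0 + p.2)) (fun y => y)).getD 0) := by
            rw [maxproj_eq (fun e => c.getD 1 0 * e.1 + e.2) arrT live
              (fun x => (mem_iff_of_count_eq hcounts x).symm)]
            rw [foldl_proj_max? (fun e => c.getD 1 0 * e.1 + e.2) live hlne]
            have hmm : live.map (fun e => c.getD 1 0 * e.1 + e.2) =
                live.map (fun p => p.1 * c.getD 1 0 + p.2) :=
              List.map_congr_left (fun p _ => by ring)
            rw [hmm]
          have hA : stepA cmds (arrT, ans) c =
              (arrT, ans ++ [PySem.Int.toStr (arrT.foldl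
                (fun m e => max m (c.getD 1 0 * e.1 + e.2)) 0)]) := by
            simp only [stepA]
            rw [if_neg hf1, if_neg hf2, if_neg he]
          have hB : altStep2 (altSpans cmds) (ans, (t : Int)) c =
              (ans ++ [PySem.Int.toStr (max 0 ((PySem.List.max? (live.map
                (fun p => p.1 * c.getD 1 0 + p.2)) (fun y => y)).getD 0))],
               (t : Int) + 1) := by
            simp only [altStep2]
            rw [if_neg hf1, if_neg hf2, ← hlive,
              if_neg (by rw [hemp]; exact he)]
          rw [hA, hB, hmax, show arrT = (cmds.take (t + 1)).foldl (stepArr cmds) [] from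
            hArrStep ▸ harr', hcast]
          exact ih (t + 1) hdrop' _

-- ===== VERDICT (by name: the statement is the Claim_ definition above) =====
theorem solution_spec : Claim_equal_solution := by
  intro cmds _ _
  unfold Spec_solution solution solution_alt
  congr 1
  have h := pass2 cmds (altSpans_count cmds) cmds 0 rfl []
  simpa using h
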